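-- pv_equiv track=rewrite | github.com/boisvert42/npr-puzzle-python | nprcommontools.py | letter_shift
-- ===== SOURCE A (Python) =====
-- def letter_shift(l,n):
--     '''
--     letter_shift(l,n): shift letter l by n places
--
--     NOTE: always returns a lowercase letter
--     '''
--     l = l.lower()
--     assert type(n) == int
--     assert len(l) == 1
--
--     new_ord = ord(l) + n
--     while new_ord > 122:
--         new_ord = new_ord - 26
--     return chr(new_ord)
-- ===== SOURCE B (Python) =====
-- def letter_shift(l,n):
--     '''
--     letter_shift(l,n): shift letter l by n places
--
--     NOTE: always returns a lowercase letter
--     '''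
--     l = l.lower()
--     assert type(n) == int
--     assert len(l) == 1
--     new_ord = ord(l) + n
--     if new_ord > 122:
--         new_ord = (new_ord - 123) % 26 + 97
--     return chr(new_ord)
-- ===== Notes on version B (the rewrite author's own statement) =====
-- stated objective: faster
-- what changed: Replaces the repeated-subtraction while loop (subtract 26 until <=123) with a single guarded modular formula (new_ord-123)%26+97 applied only when new_ord>122.
import Mathlib
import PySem

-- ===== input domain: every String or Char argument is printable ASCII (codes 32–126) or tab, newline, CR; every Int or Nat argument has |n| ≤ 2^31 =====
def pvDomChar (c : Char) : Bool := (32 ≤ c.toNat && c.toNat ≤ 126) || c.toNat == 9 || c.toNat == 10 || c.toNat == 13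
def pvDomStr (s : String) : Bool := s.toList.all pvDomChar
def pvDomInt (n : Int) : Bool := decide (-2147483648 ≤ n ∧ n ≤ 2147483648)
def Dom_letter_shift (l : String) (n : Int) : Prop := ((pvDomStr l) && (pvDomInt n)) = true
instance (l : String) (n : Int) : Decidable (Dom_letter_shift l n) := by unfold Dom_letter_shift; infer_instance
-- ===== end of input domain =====

-- ===== PORT A =====
-- B replaces A's repeated-subtraction loop with a guarded O(1) modular formula; faster for large n.
-- while new_ord > 122: new_ord = new_ord - 26
def pvShiftLoop (x : Int) : Int :=
  if x > 122 then pvShiftLoop (x - 26) else x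
termination_by (x - 96).toNat
decreasing_by omega

def letter_shift (l : String) (n : Int) : String :=
  match (PySem.Str.lower l).toList with
  | [c] => String.ofList [Char.ofNat (pvShiftLoop ((c.toNat : Int) + n)).toNat]
  | _ => ""   -- assert len(l) == 1 fails here: excluded by Pre_

-- ===== PORT B =====
def letter_shift_alt (l : String) (n : Int) : String :=
  let cs := (PySem.Str.lower l).toList
  if cs.length = 1 then
    let newOrd : Int := ((cs.headD ' ').toNat : Int) + n
    let newOrd := if newOrd > 122 then PySem.Int.mod (newOrd - 123) 26 + 97 else newOrd
    String.ofList [Char.ofNat newOrd.toNat]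
  else ""   -- assert len(l) == 1 fails here: excluded by Pre_

-- ===== PRECONDITION & SPEC =====
-- Pre_: the Python A returns normally iff len(l) == 1 and chr's argument ord(l.lower()) + n is nonnegative
-- (a negative argument makes chr raise ValueError; len(l) != 1 fails the assert).
def Pre_letter_shift (l : String) (n : Int) : Prop :=
  l.toList.length = 1 ∧ 0 ≤ (((PySem.Str.lower l).toList.headD ' ').toNat : Int) + n
instance (l : String) (n : Int) : Decidable (Pre_letter_shift l n) := by unfold Pre_letter_shift; infer_instance
def pvWitness_letter_shift : String × Int := ("a", 5)
def Spec_letter_shift (l : String) (n : Int) (out : String) : Prop := out = letter_shift_alt l n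
instance (l : String) (n : Int) (out : String) : Decidable (Spec_letter_shift l n out) := by unfold Spec_letter_shift; infer_instance

-- ===== CLAIM (what is proved, stated in full; the proofs are below) =====
def Claim_equal_letter_shift : Prop := ∀ (l : String) (n : Int), Dom_letter_shift l n → Pre_letter_shift l n → Spec_letter_shift l n (letter_shift l n)

-- ===== LEMMAS AND PROOFS =====
theorem pvShiftLoop_eq (x : Int) :
    pvShiftLoop x = if x > 122 then PySem.Int.mod (x - 123) 26 + 97 else x := by
  induction x using pvShiftLoop.induct with
  | case1 x h ih =>
    rw [pvShiftLoop, if_pos h, ih]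
    simp only [PySem.Int.mod_eq_emod_of_pos (show (0:Int) < 26 by omega)]
    split_ifs <;> omega
  | case2 x h => rw [pvShiftLoop, if_neg h, if_neg h]

-- ===== VERDICT (by name: the statement is the Claim_ definition above) =====
theorem letter_shift_spec : Claim_equal_letter_shift := by
  intro l n _ _
  unfold Spec_letter_shift
  rcases h : (PySem.Str.lower l).toList with _ | ⟨c, _ | ⟨d, ds⟩⟩ <;>
    simp [letter_shift, letter_shift_alt, h, pvShiftLoop_eq]
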